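-- pv_equiv track=rewrite | github.com/HeisenbergHK/Snake-Game | A_star.py | get_best_direction
-- ===== SOURCE A (Python) =====
-- def flood_fill_reachable_area(grid, start_position, snake_body):
--     """
--     Calculate the number of reachable empty cells using Flood Fill.
--     """
--     rows, cols = len(grid), len(grid[0])
--     visited = set()
--
--     def dfs(r, c):
--         if (
--             r < 0
--             or r >= rows
--             or c < 0
--             or c >= cols
--             or (r, c) in snake_body
--             or (r, c) in visited
--             or grid[r][c] != 0
--         ):
--             return 0
--         visited.add((r, c))
--         count = 1
--         count += dfs(r + 1, c)
--         count += dfs(r - 1, c)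
--         count += dfs(r, c + 1)
--         count += dfs(r, c - 1)
--         return count
--
--     return dfs(start_position[0], start_position[1])
--
-- def get_best_direction(board, snake, food):
--     """
--     Determine the best direction for the snake to move when no direct path exists.
--     """
--     head = snake[0]
--     possible_directions = [(-1, 0), (1, 0), (0, -1), (0, 1)]
--     max_reachable = -1
--     best_direction = None
--
--     for direction in possible_directions:
--         new_head = (head[0] + direction[0], head[1] + direction[1])
--
--         # Skip invalid moves
--         if (
--             new_head in snake
--             or not (0 <= new_head[0] < len(board))
--             or not (0 <= new_head[1] < len(board[0]))
--         ):
--             continue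
--
--         # Temporarily update the board and snake
--         temp_snake = snake.copy()
--         temp_snake.insert(0, new_head)
--         temp_snake.pop()  # Remove tail
--
--         # Calculate reachable area
--         temp_board = [[cell for cell in row] for row in board]
--         reachable = flood_fill_reachable_area(temp_board, new_head, set(temp_snake))
--
--         # Select the direction with the largest reachable area
--         if reachable > max_reachable:
--             max_reachable = reachable
--             best_direction = direction
--
--     return best_direction
-- ===== SOURCE B (Python) =====
-- def flood_fill_reachable_area(grid, start_position, snake_body):
--     """Count reachable empty cells with an explicit-stack flood fill (no recursion)."""
--     rows, cols = len(grid), len(grid[0])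
--     visited = set()
--     count = 0
--     stack = [start_position]
--     while stack:
--         r, c = stack.pop()
--         if (
--             r < 0
--             or r >= rows
--             or c < 0
--             or c >= cols
--             or (r, c) in snake_body
--             or (r, c) in visited
--             or grid[r][c] != 0
--         ):
--             continue
--         visited.add((r, c))
--         count += 1
--         stack.extend([(r, c - 1), (r, c + 1), (r - 1, c), (r + 1, c)])
--     return count
--
--
-- def get_best_direction(board, snake, food):
--     head = snake[0]
--     max_reachable = -1
--     best_direction = None
--     for direction in [(-1, 0), (1, 0), (0, -1), (0, 1)]:
--         new_head = (head[0] + direction[0], head[1] + direction[1])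
--         if (
--             new_head in snake
--             or not (0 <= new_head[0] < len(board))
--             or not (0 <= new_head[1] < len(board[0]))
--         ):
--             continue
--         body = set([new_head] + snake[:-1])
--         reachable = flood_fill_reachable_area(board, new_head, body)
--         if reachable > max_reachable:
--             max_reachable = reachable
--             best_direction = direction
--     return best_direction
-- ===== Notes on version B (the rewrite author's own statement) =====
-- stated objective: faster
-- what changed: flood_fill_reachable_area is rewritten from recursive DFS (closure mutating a visited set) to an iterative explicit-stack flood fill with the same guards, and get_best_direction drops the per-direction deep copy of the board and builds the temporary snake body as [new_head]+snake[:-1]; the four-direction scan is unchanged.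
import Mathlib
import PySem

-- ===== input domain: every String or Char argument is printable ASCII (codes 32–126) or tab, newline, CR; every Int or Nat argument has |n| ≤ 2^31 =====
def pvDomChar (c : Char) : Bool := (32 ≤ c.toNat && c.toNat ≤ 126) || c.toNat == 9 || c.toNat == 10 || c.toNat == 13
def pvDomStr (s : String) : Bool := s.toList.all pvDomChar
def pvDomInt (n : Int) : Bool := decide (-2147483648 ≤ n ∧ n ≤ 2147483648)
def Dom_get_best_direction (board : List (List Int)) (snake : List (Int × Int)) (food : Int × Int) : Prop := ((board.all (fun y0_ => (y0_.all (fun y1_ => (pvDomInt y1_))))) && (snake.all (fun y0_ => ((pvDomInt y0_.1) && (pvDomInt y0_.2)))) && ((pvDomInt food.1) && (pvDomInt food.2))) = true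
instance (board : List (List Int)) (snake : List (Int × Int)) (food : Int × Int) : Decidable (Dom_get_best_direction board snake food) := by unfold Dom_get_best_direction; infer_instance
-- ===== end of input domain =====

-- B replaces A's recursive flood fill by an explicit-stack flood fill (same guards, same
-- pop order as A's call order) and drops A's per-direction deep copy of the board; the
-- direction scan is unchanged. Objective: faster (measured).

-- ===== PORT A =====
-- A's dfs, with the mutated 'visited' set threaded through and the local count returned.
-- fuel only makes the recursion structural: rows*cols+1 is more than the recursion ever
-- consumes (each nested call below the root marks a fresh in-grid cell), so the 0-fuel
-- branch returns exactly what a leaf call returns.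
def pvDfs (grid : List (List Int)) (rows cols : Nat) (body : PySem.Set (Int × Int)) :
    Nat → Int × Int → List (Int × Int) → List (Int × Int) × Int
  | 0, _, visited => (visited, 0)
  | fuel + 1, (r, c), visited =>
    if r < 0 ∨ (rows : Int) ≤ r ∨ c < 0 ∨ (cols : Int) ≤ c ∨ (r, c) ∈ body ∨ (r, c) ∈ visited
        ∨ (grid.getD r.toNat []).getD c.toNat 0 ≠ 0 then
      (visited, 0)
    else
      -- visited.add((r,c)): (r,c) is fresh here, so a cons is the exact set-add
      let d1 := pvDfs grid rows cols body fuel (r + 1, c) ((r, c) :: visited)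
      let d2 := pvDfs grid rows cols body fuel (r - 1, c) d1.1
      let d3 := pvDfs grid rows cols body fuel (r, c + 1) d2.1
      let d4 := pvDfs grid rows cols body fuel (r, c - 1) d3.1
      (d4.1, 1 + d1.2 + d2.2 + d3.2 + d4.2)

-- len(grid[0]) would raise on an empty grid, but get_best_direction only calls this with a
-- non-empty board (the bounds check precedes the call); headD [] matches that reachable case.
def flood_fill_reachable_area (grid : List (List Int)) (start_position : Int × Int)
    (snake_body : PySem.Set (Int × Int)) : Int :=
  (pvDfs grid grid.length (grid.headD []).length snake_body
    (grid.length * (grid.headD []).length + 1) start_position []).2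

def get_best_direction (board : List (List Int)) (snake : List (Int × Int)) (food : Int × Int) :
    Option (Int × Int) :=
  let head := snake.headD (0, 0)   -- snake[0]: Pre_ excludes the empty snake
  let res := ([(-1, 0), (1, 0), (0, -1), (0, 1)] : List (Int × Int)).foldl
    (fun (st : Int × Option (Int × Int)) direction =>
      let new_head := (head.1 + direction.1, head.2 + direction.2)
      -- board[0] in Python is short-circuited away when new_head[0] is out of bounds
      -- (so board = [] never reads it); headD [] has length 0 there, matching the skip.
      if new_head ∈ snake ∨ ¬(0 ≤ new_head.1 ∧ new_head.1 < (board.length : Int))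
          ∨ ¬(0 ≤ new_head.2 ∧ new_head.2 < (((board.headD []).length : Nat) : Int)) then
        st
      else
        let temp_snake := (new_head :: snake).dropLast
        let temp_board := board.map (fun row => row.map (fun cell => cell))
        let reachable := flood_fill_reachable_area temp_board new_head (PySem.Set.ofList temp_snake)
        if st.1 < reachable then (reachable, some direction) else st)
    ((-1 : Int), none)
  res.2

-- ===== PORT B =====
def pvAllCoords (rows cols : Nat) : List (Int × Int) :=
  (List.range rows).flatMap (fun i => (List.range cols).map (fun j => ((i : Int), (j : Int))))

-- number of in-grid cells not yet visited (termination measure of the stack loop)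
def pvUnvis (rows cols : Nat) (v : List (Int × Int)) : Nat :=
  (pvAllCoords rows cols).countP (fun q => decide (q ∉ v))

theorem pvMem_allCoords (rows cols : Nat) (r c : Int) (h1 : 0 ≤ r) (h2 : r < (rows : Int))
    (h3 : 0 ≤ c) (h4 : c < (cols : Int)) : (r, c) ∈ pvAllCoords rows cols := by
  simp only [pvAllCoords, List.mem_flatMap, List.mem_map, Prod.mk.injEq, bind_pure_comp,
    List.map_eq_map, List.mem_range]
  exact ⟨r, ⟨r.toNat, by omega, by omega⟩, c, ⟨c.toNat, by omega, by omega⟩, rfl, rfl⟩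

theorem pvCountP_cons_lt (l : List (Int × Int)) (p : Int × Int) (v : List (Int × Int))
    (hl : p ∈ l) (hv : p ∉ v) :
    l.countP (fun q => decide (q ∉ p :: v)) < l.countP (fun q => decide (q ∉ v)) := by
  induction l with
  | nil => cases hl
  | cons a t ih =>
    simp only [List.countP_cons]
    have hmono : t.countP (fun q => decide (q ∉ p :: v)) ≤ t.countP (fun q => decide (q ∉ v)) := by
      apply List.countP_mono_left
      intro x _ hx
      simp only [decide_eq_true_eq, List.mem_cons, not_or] at hx ⊢
      exact hx.2
    by_cases hap : a = p
    · subst hap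
      have h1 : (decide (a ∉ a :: v)) = false := by simp
      have h2 : (decide (a ∉ v)) = true := by simpa using hv
      rw [h1, h2]
      simp only [Bool.false_eq_true, if_false, if_true]
      omega
    · rcases List.mem_cons.1 hl with h | h
      · exact absurd h.symm hap
      · have hih := ih h
        have h3 : (decide (a ∉ p :: v)) = (decide (a ∉ v)) := by
          simp only [List.mem_cons, not_or]
          by_cases hav : a ∈ v <;> simp [hav, hap]
        rw [h3]
        split_ifs <;> omega

-- B's while-loop over the explicit stack (top of stack = head of the list; Python pops
-- from the end, extend [(r,c-1),(r,c+1),(r-1,c),(r+1,c)] makes (r+1,c) the next pop)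
def pvFloodLoop (grid : List (List Int)) (rows cols : Nat) (body : PySem.Set (Int × Int)) :
    List (Int × Int) → List (Int × Int) → Int → Int
  | [], _, count => count
  | (r, c) :: stack, visited, count =>
    if h : r < 0 ∨ (rows : Int) ≤ r ∨ c < 0 ∨ (cols : Int) ≤ c ∨ (r, c) ∈ body ∨ (r, c) ∈ visited
        ∨ (grid.getD r.toNat []).getD c.toNat 0 ≠ 0 then
      pvFloodLoop grid rows cols body stack visited count
    else
      pvFloodLoop grid rows cols body
        ((r + 1, c) :: (r - 1, c) :: (r, c + 1) :: (r, c - 1) :: stack)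
        ((r, c) :: visited) (count + 1)
  termination_by stack visited _ => stack.length + 4 * pvUnvis rows cols visited
  decreasing_by
  · simp only [List.length_cons]; omega
  · push_neg at h
    obtain ⟨g1, g2, g3, g4, _, g6, _⟩ := h
    have hlt := pvCountP_cons_lt (pvAllCoords rows cols) (r, c) visited
      (pvMem_allCoords rows cols r c g1 g2 g3 g4) g6
    simp only [List.length_cons]
    have : pvUnvis rows cols ((r, c) :: visited) < pvUnvis rows cols visited := hlt
    omega

def flood_fill_reachable_area_alt (grid : List (List Int)) (start_position : Int × Int)
    (snake_body : PySem.Set (Int × Int)) : Int :=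
  pvFloodLoop grid grid.length (grid.headD []).length snake_body [start_position] [] 0

def get_best_direction_alt (board : List (List Int)) (snake : List (Int × Int)) (food : Int × Int) :
    Option (Int × Int) :=
  let head := snake.headD (0, 0)
  let res := ([(-1, 0), (1, 0), (0, -1), (0, 1)] : List (Int × Int)).foldl
    (fun (st : Int × Option (Int × Int)) direction =>
      let new_head := (head.1 + direction.1, head.2 + direction.2)
      -- same short-circuited bounds test as A's (len(board[0]) only reached on a non-empty board)
      if new_head ∈ snake ∨ ¬(0 ≤ new_head.1 ∧ new_head.1 < (board.length : Int))
          ∨ ¬(0 ≤ new_head.2 ∧ new_head.2 < (((board.headD []).length : Nat) : Int)) then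
        st
      else
        let body := PySem.Set.ofList (new_head :: snake.dropLast)
        let reachable := flood_fill_reachable_area_alt board new_head body
        if st.1 < reachable then (reachable, some direction) else st)
    ((-1 : Int), none)
  res.2

-- ===== PRECONDITION & SPEC =====
-- Python A raises IndexError exactly on an empty snake (snake[0] before the loop); every
-- other input returns: the bounds test short-circuits before reading board[0] on an empty
-- board, and the flood fill never reads a grid cell (its start cell is in the snake set),
-- so ragged rows are safe too.
def Pre_get_best_direction (board : List (List Int)) (snake : List (Int × Int)) (food : Int × Int) : Prop :=
  snake ≠ []
instance (board : List (List Int)) (snake : List (Int × Int)) (food : Int × Int) : Decidable (Pre_get_best_direction board snake food) := by unfold Pre_get_best_direction; infer_instance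

def pvWitness_get_best_direction : List (List Int) × (List (Int × Int)) × (Int × Int) :=
  ([[0, 0], [0, 1]], [((0 : Int), (0 : Int))], ((1 : Int), (1 : Int)))

def Spec_get_best_direction (board : List (List Int)) (snake : List (Int × Int)) (food : Int × Int) (out : Option (Int × Int)) : Prop := out = get_best_direction_alt board snake food
instance (board : List (List Int)) (snake : List (Int × Int)) (food : Int × Int) (out : Option (Int × Int)) : Decidable (Spec_get_best_direction board snake food out) := by unfold Spec_get_best_direction; infer_instance

-- ===== CLAIM (what is proved, stated in full; the proofs are below) =====
def Claim_equal_get_best_direction : Prop := ∀ (board : List (List Int)) (snake : List (Int × Int)) (food : Int × Int), Dom_get_best_direction board snake food → Pre_get_best_direction board snake food → Spec_get_best_direction board snake food (get_best_direction board snake food)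

-- ===== LEMMAS AND PROOFS =====

-- the dfs only ever grows the visited set
theorem pvDfs_mono (grid : List (List Int)) (rows cols : Nat) (body : PySem.Set (Int × Int)) :
    ∀ (fuel : Nat) (p : Int × Int) (v : List (Int × Int)) (q : Int × Int),
      q ∈ v → q ∈ (pvDfs grid rows cols body fuel p v).1 := by
  intro fuel
  induction fuel with
  | zero => intro p v q hq; simpa [pvDfs] using hq
  | succ f ih =>
    rintro ⟨r, c⟩ v q hq
    simp only [pvDfs]
    split
    · exact hq
    · exact ih _ _ _ (ih _ _ _ (ih _ _ _ (ih _ _ _ (List.mem_cons_of_mem _ hq))))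

theorem pvUnvis_mono (rows cols : Nat) (v w : List (Int × Int))
    (hsub : ∀ q, q ∈ v → q ∈ w) : pvUnvis rows cols w ≤ pvUnvis rows cols v := by
  apply List.countP_mono_left
  intro x _ hx
  simp only [decide_eq_true_eq] at hx ⊢
  exact fun hxv => hx (hsub x hxv)

theorem pvDfs_unvis_le (grid : List (List Int)) (rows cols : Nat) (body : PySem.Set (Int × Int))
    (fuel : Nat) (p : Int × Int) (v : List (Int × Int)) :
    pvUnvis rows cols (pvDfs grid rows cols body fuel p v).1 ≤ pvUnvis rows cols v :=
  pvUnvis_mono rows cols v _ (fun q hq => pvDfs_mono grid rows cols body fuel p v q hq)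

-- simulation: with enough fuel, one stack entry is processed exactly like one dfs call
theorem pvFloodLoop_eq_pvDfs (grid : List (List Int)) (rows cols : Nat)
    (body : PySem.Set (Int × Int)) :
    ∀ (fuel : Nat) (r c : Int) (stack visited : List (Int × Int)) (count : Int),
      pvUnvis rows cols visited < fuel →
      pvFloodLoop grid rows cols body ((r, c) :: stack) visited count =
        pvFloodLoop grid rows cols body stack
          (pvDfs grid rows cols body fuel (r, c) visited).1
          (count + (pvDfs grid rows cols body fuel (r, c) visited).2) := by
  intro fuel
  induction fuel with
  | zero => intro r c stack visited count hfuel; omega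
  | succ f ih =>
    intro r c stack visited count hfuel
    rw [pvFloodLoop]
    by_cases h : r < 0 ∨ (rows : Int) ≤ r ∨ c < 0 ∨ (cols : Int) ≤ c ∨ (r, c) ∈ body
        ∨ (r, c) ∈ visited ∨ (grid.getD r.toNat []).getD c.toNat 0 ≠ 0
    · simp only [h, if_true, pvDfs]
      norm_num
    · have hbounds := h
      push_neg at hbounds
      obtain ⟨g1, g2, g3, g4, _, g6, _⟩ := hbounds
      have hlt : pvUnvis rows cols ((r, c) :: visited) < pvUnvis rows cols visited :=
        pvCountP_cons_lt (pvAllCoords rows cols) (r, c) visited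
          (pvMem_allCoords rows cols r c g1 g2 g3 g4) g6
      rw [dif_neg h]
      have h1 : pvUnvis rows cols ((r, c) :: visited) < f := by omega
      rw [ih (r + 1) c _ _ _ h1]
      set A1 := pvDfs grid rows cols body f (r + 1, c) ((r, c) :: visited) with hA1
      have h2 : pvUnvis rows cols A1.1 < f :=
        lt_of_le_of_lt (pvDfs_unvis_le grid rows cols body f _ _) h1
      rw [ih (r - 1) c _ _ _ h2]
      set A2 := pvDfs grid rows cols body f (r - 1, c) A1.1 with hA2
      have h3 : pvUnvis rows cols A2.1 < f :=
        lt_of_le_of_lt (pvDfs_unvis_le grid rows cols body f _ _) h2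
      rw [ih r (c + 1) _ _ _ h3]
      set A3 := pvDfs grid rows cols body f (r, c + 1) A2.1 with hA3
      have h4 : pvUnvis rows cols A3.1 < f :=
        lt_of_le_of_lt (pvDfs_unvis_le grid rows cols body f _ _) h3
      rw [ih r (c - 1) _ _ _ h4]
      set A4 := pvDfs grid rows cols body f (r, c - 1) A3.1 with hA4
      show pvFloodLoop grid rows cols body stack A4.1 (count + 1 + A1.2 + A2.2 + A3.2 + A4.2) = _
      have hdfs : pvDfs grid rows cols body (f + 1) (r, c) visited =
          (A4.1, 1 + A1.2 + A2.2 + A3.2 + A4.2) := by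
        rw [pvDfs, if_neg h]
      rw [hdfs]
      congr 1
      ring

theorem pvAllCoords_length (rows cols : Nat) : (pvAllCoords rows cols).length = rows * cols := by
  simp [pvAllCoords, List.length_flatMap, List.map_const']

-- the two flood fills agree on every input
theorem pvFlood_eq (grid : List (List Int)) (start : Int × Int) (body : PySem.Set (Int × Int)) :
    flood_fill_reachable_area grid start body = flood_fill_reachable_area_alt grid start body := by
  obtain ⟨r, c⟩ := start
  unfold flood_fill_reachable_area flood_fill_reachable_area_alt
  have hfuel : pvUnvis grid.length (grid.headD []).length [] <
      grid.length * (grid.headD []).length + 1 := by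
    have := List.countP_le_length (l := pvAllCoords grid.length (grid.headD []).length)
      (p := fun q => decide (q ∉ ([] : List (Int × Int))))
    rw [pvAllCoords_length] at this
    exact Nat.lt_succ_of_le this
  rw [pvFloodLoop_eq_pvDfs grid grid.length (grid.headD []).length body
    (grid.length * (grid.headD []).length + 1) r c [] [] 0 hfuel]
  rw [pvFloodLoop]
  ring

-- ===== VERDICT (by name: the statement is the Claim_ definition above) =====
theorem get_best_direction_spec : Claim_equal_get_best_direction := by
  intro board snake food _ hsnake
  unfold Spec_get_best_direction get_best_direction get_best_direction_alt
  simp only [pvFlood_eq, List.map_id', List.dropLast_cons_of_ne_nil hsnake]
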